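-- pv_equiv track=rewrite | github.com/MrBrantCode/unitest_baseline | mut_generate/mist_train_taco/taco_4803/solution.py | partition_triples
-- ===== SOURCE A (Python) =====
-- def partition_triples(N, K):
--     if 2 * K - 1 > N:
--         return -1
--
--     a = [i for i in range(K, K + N)]
--     A = []
--     for i in range(len(a)):
--         if i % 2 == 0:
--             A.append(a[i])
--     for i in range(len(a)):
--         if i % 2 == 1:
--             A.append(a[i])
--
--     b1 = [i for i in range(K + N, K + N + (N + 1) // 2)]
--     b2 = [i for i in range(K + N + (N + 1) // 2, K + 2 * N)]
--     b1.reverse()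
--     b2.reverse()
--     B = b1 + b2
--
--     C = [i for i in range(K + 2 * N, K + 3 * N)]
--
--     result = [(A[i], B[i], C[i]) for i in range(N)]
--     return result
-- ===== SOURCE B (Python) =====
-- def partition_triples(N, K):
--     if 2 * K - 1 > N:
--         return -1
--     h = (N + 1) // 2
--     return [((K + 2 * i) if i < h else (K + 2 * (i - h) + 1),
--              (K + N + h - 1 - i) if i < h else (K + 2 * N - 1 - (i - h)),
--              K + 2 * N + i)
--             for i in range(N)]
-- ===== Notes on version B (the rewrite author's own statement) =====
-- stated objective: simpler
-- what changed: A builds four intermediate lists, interleaves one in two passes, reverses two halves and zips by index; B computes each triple directly from its index with closed-form arithmetic in a single comprehension.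
-- outside the precondition, e.g. on partition_triples(2, 2): A returns -1, B returns -1
import Mathlib
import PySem

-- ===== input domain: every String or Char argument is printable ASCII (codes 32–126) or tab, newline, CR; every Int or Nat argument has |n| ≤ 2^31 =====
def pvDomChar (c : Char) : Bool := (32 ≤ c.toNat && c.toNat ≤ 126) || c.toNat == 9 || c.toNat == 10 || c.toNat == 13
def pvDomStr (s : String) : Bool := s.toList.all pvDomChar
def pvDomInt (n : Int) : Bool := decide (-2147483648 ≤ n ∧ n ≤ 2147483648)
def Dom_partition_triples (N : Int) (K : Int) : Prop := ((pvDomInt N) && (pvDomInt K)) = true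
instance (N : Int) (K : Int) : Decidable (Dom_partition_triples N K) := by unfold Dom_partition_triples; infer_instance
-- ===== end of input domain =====

-- B replaces A's four intermediate lists, two reversals and final index-zip by one comprehension
-- computing each triple from its index in closed form (objective: simpler).
-- Python's `-1` sentinel return (not a list) is modelled as `none`.

-- ===== PORT A =====
-- literal transliteration of A; list indexing a[i]/A[i]/B[i]/C[i] is pyGetD with default 0:
-- every index is generated by range over the list's own length, so it is always in range
-- and the default is never produced.
def partition_triples (N : Int) (K : Int) : Option (List (Int × Int × Int)) :=
  if 2 * K - 1 > N then none
  else
    let a := PySem.List.pyRange K (K + N) 1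
    let A1 := (PySem.List.pyRange 0 (a.length : Int) 1).foldl
      (fun acc i => if i % 2 == 0 then acc ++ [PySem.List.pyGetD a i 0] else acc) []
    let A2 := (PySem.List.pyRange 0 (a.length : Int) 1).foldl
      (fun acc i => if i % 2 == 1 then acc ++ [PySem.List.pyGetD a i 0] else acc) A1
    let b1 := PySem.List.pyRange (K + N) (K + N + PySem.Int.floordiv (N + 1) 2) 1
    let b2 := PySem.List.pyRange (K + N + PySem.Int.floordiv (N + 1) 2) (K + 2 * N) 1
    let B := b1.reverse ++ b2.reverse
    let C := PySem.List.pyRange (K + 2 * N) (K + 3 * N) 1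
    some ((PySem.List.pyRange 0 N 1).map (fun i =>
      (PySem.List.pyGetD A2 i 0, PySem.List.pyGetD B i 0, PySem.List.pyGetD C i 0)))

-- ===== PORT B =====
def partition_triples_alt (N : Int) (K : Int) : Option (List (Int × Int × Int)) :=
  if 2 * K - 1 > N then none
  else
    let h := PySem.Int.floordiv (N + 1) 2
    some ((PySem.List.pyRange 0 N 1).map (fun i =>
      (if i < h then K + 2 * i else K + 2 * (i - h) + 1,
       if i < h then K + N + h - 1 - i else K + 2 * N - 1 - (i - h),
       K + 2 * N + i)))

-- ===== PRECONDITION & SPEC =====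
-- Pre_ excludes exactly the inputs with 2*K-1 > N, on which A returns the integer sentinel -1,
-- which is not a value of the declared return type (a list of triples).
def Pre_partition_triples (N : Int) (K : Int) : Prop := 2 * K - 1 ≤ N
instance (N : Int) (K : Int) : Decidable (Pre_partition_triples N K) := by unfold Pre_partition_triples; infer_instance
def pvWitness_partition_triples : Int × Int := (3, 1)

def Spec_partition_triples (N : Int) (K : Int) (out : Option (List (Int × Int × Int))) : Prop := out = partition_triples_alt N K
instance (N : Int) (K : Int) (out : Option (List (Int × Int × Int))) : Decidable (Spec_partition_triples N K out) := by unfold Spec_partition_triples; infer_instance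

-- ===== CLAIM (what is proved, stated in full; the proofs are below) =====
def Claim_equal_partition_triples : Prop := ∀ (N : Int) (K : Int), Dom_partition_triples N K → Pre_partition_triples N K → Spec_partition_triples N K (partition_triples N K)

-- ===== LEMMAS AND PROOFS =====

-- the even-index positions of range(n) are 2*0..2*(⌈n/2⌉-1)
lemma pv_filter_even (n : Nat) :
    List.filter (fun i => i % 2 == 0) (PySem.List.pyRange 0 (n : Int) 1)
      = List.map (fun k : Nat => ((2 * k : Nat) : Int)) (List.range ((n + 1) / 2)) := by
  induction n with
  | zero => simp
  | succ n ih =>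
    have hc : ((n : Int) + 1) = ((n + 1 : Nat) : Int) := by push_cast; ring
    rw [show ((n + 1 : Nat) : Int) = (n : Int) + 1 from by push_cast; ring,
        PySem.List.pyRange_one_succ_right (by positivity), List.filter_append, ih]
    by_cases hp : n % 2 = 0
    · have h1 : ((n : Int)) % 2 == 0 := by
        have : (n : Int) % 2 = 0 := by omega
        simp [this]
      have h2 : (n + 1 + 1) / 2 = (n + 1) / 2 + 1 := by omega
      rw [h2, List.range_succ, List.map_append]
      simp only [List.filter_cons, List.filter_nil, h1, if_pos]
      simp
      omega
    · have h1 : ¬ (((n : Int)) % 2 == 0) := by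
        have : (n : Int) % 2 = 1 := by omega
        simp [this]
      have h2 : (n + 1 + 1) / 2 = (n + 1) / 2 := by omega
      rw [h2]
      simp [h1]

lemma pv_filter_odd (n : Nat) :
    List.filter (fun i => i % 2 == 1) (PySem.List.pyRange 0 (n : Int) 1)
      = List.map (fun k : Nat => ((2 * k + 1 : Nat) : Int)) (List.range (n / 2)) := by
  induction n with
  | zero => simp
  | succ n ih =>
    rw [show ((n + 1 : Nat) : Int) = (n : Int) + 1 from by push_cast; ring,
        PySem.List.pyRange_one_succ_right (by positivity), List.filter_append, ih]
    by_cases hp : n % 2 = 1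
    · have h1 : ((n : Int)) % 2 == 1 := by
        have : (n : Int) % 2 = 1 := by omega
        simp [this]
      have h2 : (n + 1) / 2 = n / 2 + 1 := by omega
      rw [h2, List.range_succ, List.map_append]
      simp only [List.filter_cons, List.filter_nil, h1, if_pos]
      simp
      omega
    · have h1 : ¬ (((n : Int)) % 2 == 1) := by
        have : (n : Int) % 2 = 0 := by omega
        simp [this]
      have h2 : (n + 1) / 2 = n / 2 := by omega
      rw [h2]
      simp [h1]

-- ===== VERDICT (by name: the statement is the Claim_ definition above) =====
theorem partition_triples_spec : Claim_equal_partition_triples := by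
  intro N K _ hpre
  unfold Pre_partition_triples at hpre
  unfold Spec_partition_triples partition_triples partition_triples_alt
  have hg : ¬ (2 * K - 1 > N) := not_lt.mpr hpre
  simp only [if_neg hg]
  congr 1
  apply List.map_congr_left
  intro i hi
  rw [PySem.List.mem_pyRange_one] at hi
  obtain ⟨h0, hiN⟩ := hi
  have hfd : PySem.Int.floordiv (N + 1) 2 = (N + 1) / 2 := by
    simp [PySem.Int.floordiv, Int.fdiv_eq_ediv]
  rw [hfd, PySem.List.foldl_append_if, PySem.List.foldl_append_if, List.nil_append,
      PySem.List.length_pyRange_one]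
  have hKN : K + N - K = N := by ring
  rw [hKN]
  rw [pv_filter_even N.toNat, pv_filter_odd N.toNat, List.map_map, List.map_map]
  simp only [Prod.mk.injEq]
  refine ⟨?_, ?_, ?_⟩
  · -- component A
    rw [PySem.List.pyGetD_eq_getElem _ _ h0
      (by simp [PySem.List.length_pyRange_one]; omega)]
    by_cases hc : i < (N + 1) / 2
    · rw [List.getElem_append_left (by simp; omega)]
      simp only [List.getElem_map, List.getElem_range, Function.comp_apply]
      rw [PySem.List.pyGetD_eq_getElem _ _ (by positivity)
        (by rw [PySem.List.length_pyRange_one, hKN]; omega),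
        PySem.List.getElem_pyRange_one, if_pos hc]
      omega
    · rw [List.getElem_append_right (by simp; omega)]
      simp only [List.getElem_map, List.getElem_range, Function.comp_apply, List.length_map,
        List.length_range]
      rw [PySem.List.pyGetD_eq_getElem _ _ (by positivity)
        (by rw [PySem.List.length_pyRange_one, hKN]; omega),
        PySem.List.getElem_pyRange_one, if_neg hc]
      omega
  · -- component B
    rw [PySem.List.pyGetD_eq_getElem _ _ h0
      (by simp [PySem.List.length_pyRange_one]; omega)]
    by_cases hc : i < (N + 1) / 2
    · rw [List.getElem_append_left (by simp [PySem.List.length_pyRange_one]; omega)]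
      rw [List.getElem_reverse, PySem.List.getElem_pyRange_one, if_pos hc]
      simp only [List.length_reverse, PySem.List.length_pyRange_one]
      omega
    · rw [List.getElem_append_right (by simp; omega)]
      rw [List.getElem_reverse, PySem.List.getElem_pyRange_one, if_neg hc]
      simp only [List.length_reverse, PySem.List.length_pyRange_one]
      omega
  · -- component C
    rw [PySem.List.pyGetD_eq_getElem _ _ h0
      (by rw [PySem.List.length_pyRange_one]; omega),
      PySem.List.getElem_pyRange_one]
    omega
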